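-- pv_equiv track=rewrite | github.com/981377660LMT/algorithm-study | 11_动态规划/出租车问题/1751. 最多可以参加的会议数目 II-端点不可重合.py | maxValue2
-- ===== SOURCE A (Python) =====
-- from typing import List
-- from bisect import bisect_right
--
-- def maxValue2(events: List[List[int]], k: int) -> int:
--     """dp"""
--     n = len(events)
--     events.sort(key=lambda x: x[1])  # 按照end排序
--     dp = [[0] * (k + 1) for _ in range(n + 1)]
--     for i in range(n):
--         start, _, score = events[i]
--         dp[i + 1] = dp[i][:]  # 不选当前会议
--         # !选当前会议,由于端点不可重合,所以要start-1
--         prePos = bisect_right(events, start - 1, key=lambda x: x[1]) - 1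
--         for j in range(1, k + 1):
--             dp[i + 1][j] = max(dp[i + 1][j], score + dp[prePos + 1][j - 1])
--
--     return dp[-1][-1]
-- ===== SOURCE B (Python) =====
-- from typing import List
-- from bisect import bisect_right
--
--
-- def maxValue2(events: List[List[int]], k: int) -> int:
--     """Top-down memoized recursion over (first i events sorted by end, at most j picks)
--     instead of a bottom-up (n+1) x (k+1) table.  Sorts `events` in place by end point."""
--     n = len(events)
--     events.sort(key=lambda x: x[1])
--     ends = [e[1] for e in events]
--     memo = {}
--
--     def dfs(i, j):
--         # best total score using the first i events with at most j attended
--         if i == 0 or j <= 0: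
--             return 0
--         if (i, j) in memo:
--             return memo[(i, j)]
--         start, _, score = events[i - 1]
--         p = bisect_right(ends, start - 1)  # events[:p] end strictly before start
--         best = max(dfs(i - 1, j), score + dfs(p, j - 1))
--         memo[(i, j)] = best
--         return best
--
--     return dfs(n, k)
-- ===== Notes on version B (the rewrite author's own statement) =====
-- stated objective: alternative
-- what changed: Replaces A's bottom-up (n+1)x(k+1) DP table with row copies by a top-down memoized recursion dfs(i, j) over (events considered, picks allowed), computing only reachable states; both sort events in place by end point. Pre_ excludes inputs where A raises (k < 0, events not length-3 triples) and, when k > 1, malformed inputs where some event ends before it starts and another event's end (ties taken in input order) falls inside that reversed interval, for which no value is specified.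
-- outside the precondition, e.g. on maxValue2([[1, 3, 8], [5, -2, -1]], 4): A returns 8, B returns 15
import Mathlib
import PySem

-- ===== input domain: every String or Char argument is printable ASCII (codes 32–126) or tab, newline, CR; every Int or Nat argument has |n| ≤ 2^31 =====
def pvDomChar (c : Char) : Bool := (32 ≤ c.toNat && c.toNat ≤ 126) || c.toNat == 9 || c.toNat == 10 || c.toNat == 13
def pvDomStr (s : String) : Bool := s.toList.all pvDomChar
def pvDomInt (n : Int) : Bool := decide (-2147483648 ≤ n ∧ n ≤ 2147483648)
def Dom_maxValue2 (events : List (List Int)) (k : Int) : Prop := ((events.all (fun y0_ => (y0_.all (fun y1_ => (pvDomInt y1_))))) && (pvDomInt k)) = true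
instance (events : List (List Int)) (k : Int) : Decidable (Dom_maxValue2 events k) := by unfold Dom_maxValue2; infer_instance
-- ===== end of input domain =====

-- B replaces A's bottom-up (n+1)×(k+1) table with a memoized top-down recursion over
-- (events considered, picks left); equivalence is about the return value AND both sort
-- `events` in place by end point (same argument mutation).

-- ===== PORT A =====
-- key=lambda x: x[1]  (exact on Pre_: every event has length 3)
def pyKeyEnd (x : List Int) : Int := x.getD 1 0

-- literal port of A's table dp; bisect_right(events, start-1, key=...) performs binary
-- search on the key values, i.e. bisectRight on the mapped end list (same comparisons);
-- dp[-1][-1] is the trailing negative-index access, ported with pyGetD.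
def maxValue2 (events : List (List Int)) (k : Int) : Int :=
  let n := events.length
  let es := PySem.List.sorted events pyKeyEnd false          -- events.sort(key=lambda x: x[1])
  let dp0 : List (List Int) := List.replicate (n + 1) (List.replicate (k + 1).toNat 0)
  let dp := (List.range n).foldl (fun dp i =>
    let ev := es.getD i []                                   -- events[i], i < n on Pre_
    let start := ev.getD 0 0
    let score := ev.getD 2 0
    let dp := dp.set (i + 1) (dp.getD i [])                  -- dp[i+1] = dp[i][:]
    let prePos : Int := (PySem.List.bisectRight (es.map pyKeyEnd) (start - 1) : Int) - 1
    (List.range' 1 k.toNat).foldl (fun dp j =>               -- for j in range(1, k+1), k ≥ 0 on Pre_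
      dp.set (i + 1) ((dp.getD (i + 1) []).set j
        (max ((dp.getD (i + 1) []).getD j 0)
             (score + (dp.getD (prePos + 1).toNat []).getD (j - 1) 0)))) dp) dp0
  PySem.List.pyGetD (PySem.List.pyGetD dp (-1) []) (-1) 0   -- dp[-1][-1]

-- ===== PORT B =====
-- dfs(i, j) from Source B: best score using the first i end-sorted events with at most j picks.
-- Source B's `memo` dict is a pure cache of this same recursion; the port is the recursion itself.
def altDfs (events : List (List Int)) (ends : List Int) (i j : Nat) : Int :=
  if i = 0 ∨ j = 0 then 0
  else
    let ev := events.getD (i - 1) []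
    let start := ev.getD 0 0
    let score := ev.getD 2 0
    let p := PySem.List.bisectRight ends (start - 1)
    max (altDfs events ends (i - 1) j) (score + altDfs events ends p (j - 1))
termination_by (j, i)
decreasing_by
  · exact Prod.Lex.right _ (by omega)
  · exact Prod.Lex.left _ _ (by omega)

def maxValue2_alt (events : List (List Int)) (k : Int) : Int :=
  let n := events.length
  let es := PySem.List.sorted events pyKeyEnd false          -- events.sort(key=lambda x: x[1])
  let ends := es.map pyKeyEnd                                -- [e[1] for e in events]
  altDfs es ends n k.toNat                                   -- dfs(n, k), k ≥ 0 on Pre_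

-- ===== PRECONDITION & SPEC =====
-- Pre_ excludes the inputs where A raises — a negative k (dp[-1][-1] hits an empty row →
-- IndexError) and events that are not length-3 triples (the sort key / 3-way unpack raises) —
-- and malformed inputs (unless k ≤ 1, where a single pick needs no predecessor lookup)
-- where some event x ends before it starts AND another event's end falls inside that
-- reversed interval [x.end, x.start) (end-ties taken in input order): an interval cannot
-- end before it starts, and no value is specified for such input.
def Pre_maxValue2 (events : List (List Int)) (k : Int) : Prop :=
  0 ≤ k ∧ (∀ e ∈ events, e.length = 3) ∧
    (k ≤ 1 ∨
      events.Pairwise (fun x y =>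
        ¬(x.getD 1 0 ≤ y.getD 1 0 ∧ y.getD 1 0 < x.getD 0 0) ∧
        ¬(y.getD 1 0 < x.getD 1 0 ∧ x.getD 1 0 < y.getD 0 0)))
instance (events : List (List Int)) (k : Int) : Decidable (Pre_maxValue2 events k) := by
  unfold Pre_maxValue2; infer_instance

def pvWitness_maxValue2 : List (List Int) × Int := ([[1, 2, 4], [3, 4, 3], [2, 3, 1]], 2)

def Spec_maxValue2 (events : List (List Int)) (k : Int) (out : Int) : Prop := out = maxValue2_alt events k
instance (events : List (List Int)) (k : Int) (out : Int) : Decidable (Spec_maxValue2 events k out) := by unfold Spec_maxValue2; infer_instance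

-- ===== CLAIM (what is proved, stated in full; the proofs are below) =====
def Claim_equal_maxValue2 : Prop := ∀ (events : List (List Int)) (k : Int), Dom_maxValue2 events k → Pre_maxValue2 events k → Spec_maxValue2 events k (maxValue2 events k)

-- ===== LEMMAS AND PROOFS =====

-- the row of B-values [dfs r 0, …, dfs r K]
def specRow (es : List (List Int)) (ends : List Int) (K r : Nat) : List Int :=
  (List.range (K + 1)).map (fun j => altDfs es ends r j)

-- A's table after t outer iterations: rows ≤ t hold B-values, later rows are still zero
def specTable (es : List (List Int)) (ends : List Int) (K n t : Nat) : List (List Int) :=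
  (List.range (n + 1)).map
    (fun r => if r ≤ t then specRow es ends K r else List.replicate (K + 1) 0)

theorem altDfs_i_zero (es : List (List Int)) (ends : List Int) (j : Nat) :
    altDfs es ends 0 j = 0 := by
  rw [altDfs]; simp

theorem altDfs_j_zero (es : List (List Int)) (ends : List Int) (i : Nat) :
    altDfs es ends i 0 = 0 := by
  rw [altDfs]; simp

-- negative index -1 = last element (Python semantics)
theorem pyGetD_neg_one {α : Type} (xs : List α) (L : Nat) (h : xs.length = L + 1) (d : α) :
    PySem.List.pyGetD xs (-1) d = xs.getD L d := by
  simp [PySem.List.pyGetD, PySem.List.pyGet?, PySem.List.pyIdx?, h, List.getD_eq_getElem?_getD]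

theorem getD_set {α : Type} (l : List α) (i j : Nat) (a d : α) :
    (l.set i a).getD j d = if i = j ∧ i < l.length then a else l.getD j d := by
  simp only [List.getD_eq_getElem?_getD, List.getElem?_set]
  by_cases h1 : i = j
  · subst h1
    by_cases h2 : i < l.length <;> simp [h2]
  · simp [h1]

theorem set_map_range {α : Type} (f : Nat → α) (N a : Nat) (v : α) (_ha : a < N) :
    ((List.range N).map f).set a v = (List.range N).map (fun j => if j = a then v else f j) := by
  apply List.ext_getElem
  · simp
  · intro i h1 h2
    simp only [List.getElem_set, List.getElem_map, List.getElem_range] at *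
    by_cases h : a = i <;> simp [h]; omega

theorem specRow_getD (es : List (List Int)) (ends : List Int) (K r j : Nat) (hj : j < K + 1) :
    (specRow es ends K r).getD j 0 = altDfs es ends r j := by
  unfold specRow
  exact PySem.List.getD_map_range _ _ _ _ hj

theorem specRow_zero (es : List (List Int)) (ends : List Int) (K : Nat) :
    specRow es ends K 0 = List.replicate (K + 1) 0 := by
  apply List.ext_getElem
  · simp [specRow]
  · intro i h1 h2
    simp [specRow, altDfs_i_zero]

theorem specTable_getD (es : List (List Int)) (ends : List Int) (K n t r : Nat) (hr : r < n + 1) :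
    (specTable es ends K n t).getD r [] =
      if r ≤ t then specRow es ends K r else List.replicate (K + 1) 0 := by
  unfold specTable
  exact PySem.List.getD_map_range _ _ _ _ hr

theorem specTable_length (es : List (List Int)) (ends : List Int) (K n t : Nat) :
    (specTable es ends K n t).length = n + 1 := by simp [specTable]

theorem specTable_zero (es : List (List Int)) (ends : List Int) (K n : Nat) :
    specTable es ends K n 0 = List.replicate (n + 1) (List.replicate (K + 1) 0) := by
  apply List.ext_getElem
  · simp [specTable]
  · intro i h1 h2
    simp only [specTable, List.getElem_map, List.getElem_range, List.getElem_replicate]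
    by_cases h : i ≤ 0
    · simp [Nat.le_zero.mp h, specRow_zero]
    · simp [h]

-- the partially updated row i+1 during A's inner loop: entries ≤ m already hold
-- the new values, the rest still the copied row t
def mixRow (es : List (List Int)) (ends : List Int) (K t m : Nat) : List Int :=
  (List.range (K + 1)).map
    (fun j => if j ≤ m then altDfs es ends (t + 1) j else altDfs es ends t j)

theorem mixRow_zero (es : List (List Int)) (ends : List Int) (K t : Nat) :
    mixRow es ends K t 0 = specRow es ends K t := by
  apply List.map_congr_left
  intro j hj
  by_cases h : j ≤ 0
  · simp [Nat.le_zero.mp h, altDfs_j_zero]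
  · simp [h]

theorem mixRow_getD (es : List (List Int)) (ends : List Int) (K t m j : Nat) (hj : j < K + 1) :
    (mixRow es ends K t m).getD j 0 =
      if j ≤ m then altDfs es ends (t + 1) j else altDfs es ends t j := by
  unfold mixRow
  exact PySem.List.getD_map_range _ _ _ _ hj

-- one unfolding of B's recursion for i+1 ≥ 1, j+1 ≥ 1
theorem altDfs_succ (es : List (List Int)) (ends : List Int) (t m : Nat) :
    altDfs es ends (t + 1) (m + 1) =
      max (altDfs es ends t (m + 1))
        ((es.getD t []).getD 2 0 +
          altDfs es ends (PySem.List.bisectRight ends ((es.getD t []).getD 0 0 - 1)) m) := by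
  rw [altDfs]
  simp

-- adjacent in end-sorted order, each event starts no later than its successor ends:
-- the property that keeps A's bisect position from jumping past the row being written
def chainC (a b : List Int) : Prop := a.getD 0 0 ≤ pyKeyEnd b

-- inserting z into a chain keeps the chain, given z is compatible with every element
theorem isChain_insertBy (z : List Int) (acc : List (List Int))
    (hc : List.IsChain chainC acc)
    (hza : ∀ a ∈ acc, pyKeyEnd a ≤ pyKeyEnd z → a.getD 0 0 ≤ pyKeyEnd z)
    (hzb : ∀ b ∈ acc, pyKeyEnd z < pyKeyEnd b → z.getD 0 0 ≤ pyKeyEnd b) :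
    List.IsChain chainC
      (PySem.List.insertBy (fun a b => decide (pyKeyEnd a < pyKeyEnd b)) z acc) := by
  induction acc with
  | nil => simp [PySem.List.insertBy, List.isChain_cons]
  | cons y ys ih =>
    rw [PySem.List.insertBy]
    by_cases hlt : pyKeyEnd z < pyKeyEnd y
    · rw [if_pos (by simpa using hlt), List.isChain_cons_cons]
      exact ⟨hzb y (List.mem_cons_self ..) hlt, hc⟩
    · rw [if_neg (by simpa using hlt)]
      have hyz : pyKeyEnd y ≤ pyKeyEnd z := by omega
      have ih' := ih hc.tail
        (fun a ha hle => hza a (List.mem_cons_of_mem _ ha) hle)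
        (fun b hb hlt' => hzb b (List.mem_cons_of_mem _ hb) hlt')
      rw [List.isChain_cons]
      refine ⟨?_, ih'⟩
      intro w hw
      cases ys with
      | nil =>
        simp [PySem.List.insertBy] at hw
        subst hw
        exact hza y (List.mem_cons_self ..) hyz
      | cons y2 ys2 =>
        rw [PySem.List.insertBy] at hw
        by_cases h2 : pyKeyEnd z < pyKeyEnd y2
        · rw [if_pos (by simpa using h2)] at hw
          simp at hw
          subst hw
          exact hza y (List.mem_cons_self ..) hyz
        · rw [if_neg (by simpa using h2)] at hw
          simp at hw
          subst hw
          exact (List.isChain_cons_cons.mp hc).1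

-- on Pre_'s pairwise condition the end-sorted list is a chainC chain
theorem sorted_isChain (l : List (List Int))
    (hp : l.Pairwise (fun x y =>
        ¬(x.getD 1 0 ≤ y.getD 1 0 ∧ y.getD 1 0 < x.getD 0 0) ∧
        ¬(y.getD 1 0 < x.getD 1 0 ∧ x.getD 1 0 < y.getD 0 0))) :
    List.IsChain chainC (PySem.List.sorted l pyKeyEnd false) := by
  induction l using List.reverseRecOn with
  | nil => simp [PySem.List.sorted_eq_foldl_insertBy]
  | append_singleton l z ih =>
    rw [List.pairwise_append] at hp
    obtain ⟨hpl, -, hrz⟩ := hp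
    rw [PySem.List.sorted_eq_foldl_insertBy, List.foldl_append]
    simp only [List.foldl_cons, List.foldl_nil]
    rw [← PySem.List.sorted_eq_foldl_insertBy]
    refine isChain_insertBy z _ (ih hpl) ?_ ?_
    · intro a ha hle
      have := (hrz a ((PySem.List.mem_sorted ..).mp ha) z (List.mem_singleton.mpr rfl)).1
      simp [pyKeyEnd] at *
      omega
    · intro b hb hlt
      have := (hrz b ((PySem.List.mem_sorted ..).mp hb) z (List.mem_singleton.mpr rfl)).2
      simp [pyKeyEnd] at *
      omega

-- A's inner loop (row i+1, j = 1..M) turns the copied row into mixRow M;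
-- hpt : on Pre_ the compatible-prefix position never jumps past the row being written
-- (p ≤ t reads a finished row = dfs p; p = t + 1 is A's aliased read of the row under
-- construction at column j-1, which is exactly dfs (t+1) (j-1) — B's own recursion)
theorem inner_fold (es : List (List Int)) (ends : List Int) (K n t : Nat) (ht : t < n)
    (hpt : PySem.List.bisectRight ends ((es.getD t []).getD 0 0 - 1) ≤ t + 1 ∨ K ≤ 1) :
    ∀ M, M ≤ K →
      (List.range' 1 M).foldl
        (fun dp j =>
          dp.set (t + 1) ((dp.getD (t + 1) []).set j
            (max ((dp.getD (t + 1) []).getD j 0)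
              ((es.getD t []).getD 2 0 +
                (dp.getD (PySem.List.bisectRight ends ((es.getD t []).getD 0 0 - 1)) []).getD (j - 1) 0))))
        ((specTable es ends K n t).set (t + 1) (specRow es ends K t))
      = (specTable es ends K n t).set (t + 1) (mixRow es ends K t M) := by
  intro M
  induction M with
  | zero => intro _; simp [mixRow_zero]
  | succ m ih =>
    intro hM
    rw [List.range'_concat, List.foldl_append, ih (by omega)]
    simp only [List.foldl_cons, List.foldl_nil]
    rw [List.set_set]
    set p := PySem.List.bisectRight ends ((es.getD t []).getD 0 0 - 1) with hpdef
    have hlen : (specTable es ends K n t).length = n + 1 := specTable_length ..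
    have hidx : 1 + 1 * m = m + 1 := by omega
    rw [hidx]
    have hrow : (((specTable es ends K n t).set (t + 1) (mixRow es ends K t m)).getD (t + 1) []) =
        mixRow es ends K t m := by
      rw [getD_set]; simp [hlen, ht]
    have hread : (((specTable es ends K n t).set (t + 1) (mixRow es ends K t m)).getD p []).getD m 0 =
        altDfs es ends p m := by
      rcases Nat.eq_zero_or_pos m with hm0 | hm1
      -- column 0 reads 0 on both sides whatever the row is
      · subst hm0
        rw [altDfs_j_zero]
        have hlen0 := specTable_length es ends K n t
        by_cases hpr : p < n + 1
        · by_cases hp1 : p = t + 1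
          · rw [getD_set, if_pos ⟨hp1.symm, by omega⟩, mixRow_getD es ends K t 0 0 (by omega)]
            simp [altDfs_j_zero]
          · rw [getD_set, if_neg (by omega), specTable_getD es ends K n t p (by omega)]
            by_cases hp2 : p ≤ t
            · rw [if_pos hp2, specRow_getD es ends K p 0 (by omega), altDfs_j_zero]
            · rw [if_neg hp2]; simp
        · have hrowp : ((specTable es ends K n t).set (t + 1) (mixRow es ends K t 0)).getD p [] = [] := by
            rw [List.getD_eq_getElem?_getD,
              List.getElem?_eq_none (by rw [List.length_set, specTable_length]; omega)]
            rfl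
          rw [hrowp]
          simp
      -- for a column ≥ 1 Pre_ guarantees p ≤ t + 1
      have hpt' : p ≤ t + 1 := by
        rcases hpt with h | h
        · exact h
        · omega
      by_cases hp1 : p = t + 1
      · rw [getD_set, if_pos ⟨hp1.symm, by omega⟩,
          mixRow_getD es ends K t m m (by omega)]
        simp [hp1]
      · rw [getD_set, if_neg (by omega)]
        rw [specTable_getD es ends K n t p (by omega), if_pos (by omega),
          specRow_getD es ends K p m (by omega)]
    rw [hrow, show m + 1 - 1 = m from rfl, hread,
      mixRow_getD es ends K t m (m + 1) (by omega), if_neg (by omega), ← altDfs_succ]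
    congr 1
    rw [mixRow, set_map_range _ _ _ _ (by omega)]
    apply List.map_congr_left
    intro j hj
    simp only [List.mem_range] at hj
    by_cases h : j = m + 1
    · simp [h]
    · by_cases h2 : j ≤ m
      · simp [h, h2, show j ≤ m + 1 from by omega]
      · simp [h, h2, show ¬ (j ≤ m + 1) from by omega]

theorem mixRow_full (es : List (List Int)) (ends : List Int) (K t : Nat) :
    mixRow es ends K t K = specRow es ends K (t + 1) := by
  apply List.map_congr_left
  intro j hj
  simp only [List.mem_range] at hj
  simp [show j ≤ K from by omega]

theorem set_mix_full (es : List (List Int)) (ends : List Int) (K n t : Nat) (ht : t < n) :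
    (specTable es ends K n t).set (t + 1) (mixRow es ends K t K) = specTable es ends K n (t + 1) := by
  rw [mixRow_full]
  unfold specTable
  rw [set_map_range _ _ _ _ (by omega)]
  apply List.map_congr_left
  intro r hr
  simp only [List.mem_range] at hr
  by_cases h : r = t + 1
  · simp [h]
  · by_cases h2 : r ≤ t
    · simp [h, h2, show r ≤ t + 1 from by omega]
    · simp [h, h2, show ¬ (r ≤ t + 1) from by omega]

theorem maxValue2_spec : Claim_equal_maxValue2 := by
  intro events k hdom hpre
  obtain ⟨hk, h3, hrest⟩ := hpre
  unfold Spec_maxValue2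
  unfold maxValue2 maxValue2_alt
  simp only []
  set n := events.length with hn
  set es := PySem.List.sorted events pyKeyEnd false with hes
  set ends := es.map pyKeyEnd with hends
  set K := k.toNat with hK
  have hesl : es.length = n := PySem.List.length_sorted events pyKeyEnd false
  have hendl : ends.length = n := by rw [hends, List.length_map, hesl]
  have hsort : List.Pairwise (fun a b => a ≤ b) ends :=
    PySem.List.sorted_map_key_pairwise events pyKeyEnd
  have hendgetD : ∀ r, r < n → ∀ (hr : r < ends.length), ends[r] = (es.getD r []).getD 1 0 := by
    intro r hrn hr
    have : ends[r] = (List.map pyKeyEnd es)[r]'(by simpa [hends] using hr) := by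
      simp only [hends]
    rw [this, List.getElem_map]
    simp [pyKeyEnd, List.getD_eq_getElem?_getD, List.getElem?_eq_getElem (show r < es.length by omega)]
  -- on Pre_, the bisect position for event t never passes t + 1: a position ≥ t + 2
  -- would put es[t+1]'s end inside [es[t].end, es[t].start), the excluded bad pair
  have hpt : ∀ t, t < n →
      PySem.List.bisectRight ends ((es.getD t []).getD 0 0 - 1) ≤ t + 1 ∨ K ≤ 1 := by
    rcases hrest with hk1 | hnp
    · exact fun t _ => Or.inr (by omega)
    have hchain : List.IsChain chainC es := sorted_isChain events hnp
    refine fun t htn => Or.inl ?_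
    by_contra hgt
    push Not at hgt
    have hspec := PySem.List.bisectRight_spec ends ((es.getD t []).getD 0 0 - 1) hsort
    have ht1 : t + 1 < n := by omega
    have ht1l : t + 1 < ends.length := by omega
    have hle := hspec.2.1 (t + 1) ht1l hgt
    have hC : chainC (es[t]'(by omega)) (es[t + 1]'(by omega)) :=
      List.isChain_iff_getElem.mp hchain t (by omega)
    have hxe : es[t]'(by omega) = es.getD t [] := by
      simp [List.getD_eq_getElem?_getD, List.getElem?_eq_getElem (show t < es.length by omega)]
    have hye : es[t + 1]'(by omega) = es.getD (t + 1) [] := by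
      simp [List.getD_eq_getElem?_getD, List.getElem?_eq_getElem (show t + 1 < es.length by omega)]
    have hendt1 := hendgetD (t + 1) ht1 ht1l
    rw [hxe, hye] at hC
    unfold chainC pyKeyEnd at hC
    omega
  have hk1 : (k + 1).toNat = K + 1 := by omega
  simp only [Int.sub_add_cancel, Int.toNat_natCast, hk1]
  have hfold : ∀ m, m ≤ n →
      (List.range m).foldl
        (fun dp i =>
          List.foldl
            (fun dp j =>
              dp.set (i + 1)
                ((dp.getD (i + 1) []).set j
                  (max ((dp.getD (i + 1) []).getD j 0)
                    ((es.getD i []).getD 2 0 +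
                      (dp.getD (PySem.List.bisectRight ends ((es.getD i []).getD 0 0 - 1)) []).getD
                        (j - 1) 0))))
            (dp.set (i + 1) (dp.getD i [])) (List.range' 1 K))
        (List.replicate (n + 1) (List.replicate (K + 1) 0))
      = specTable es ends K n m := by
    intro m
    induction m with
    | zero => intro _; rw [List.range_zero, List.foldl_nil, specTable_zero]
    | succ t ih =>
      intro hm
      rw [List.range_succ, List.foldl_append, ih (by omega)]
      simp only [List.foldl_cons, List.foldl_nil]
      rw [specTable_getD es ends K n t t (by omega), if_pos le_rfl,
        inner_fold es ends K n t (by omega) (hpt t (by omega)) K le_rfl]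
      exact set_mix_full es ends K n t (by omega)
  rw [hfold n le_rfl]
  rw [pyGetD_neg_one _ n (specTable_length es ends K n n) []]
  rw [specTable_getD es ends K n n n (by omega), if_pos le_rfl]
  rw [pyGetD_neg_one _ K (by simp [specRow]) 0]
  rw [specRow_getD es ends K n K (by omega)]
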